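-- pv_equiv track=rewrite | github.com/mallurivikas/EventPro_Backend | backend/event_analytics.py | analyze_question_sentiment
-- ===== SOURCE A (Python) =====
-- def analyze_question_sentiment(question):
--     """Simple sentiment analysis for questions"""
--     positive_words = ['good', 'great', 'excellent', 'amazing', 'helpful', 'useful', 'love', 'best']
--     negative_words = ['bad', 'poor', 'terrible', 'awful', 'hate', 'worst', 'difficult', 'problem', 'issue']
--
--     question_lower = question.lower()
--     positive_count = sum(1 for word in positive_words if word in question_lower)
--     negative_count = sum(1 for word in negative_words if word in question_lower)
--
--     if positive_count > negative_count:
--         return 'positive'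
--     elif negative_count > positive_count:
--         return 'negative'
--     else:
--         return 'neutral'
-- ===== SOURCE B (Python) =====
-- def analyze_question_sentiment(question):
--     """Sentiment by a single left-to-right scan of the text: at each position,
--     mark any keyword that starts there (first occurrence only) and update one
--     signed score; A instead runs a containment test per keyword."""
--     weights = {'good': 1, 'great': 1, 'excellent': 1, 'amazing': 1,
--                'helpful': 1, 'useful': 1, 'love': 1, 'best': 1,
--                'bad': -1, 'poor': -1, 'terrible': -1, 'awful': -1,
--                'hate': -1, 'worst': -1, 'difficult': -1, 'problem': -1,
--                'issue': -1}
--     q = question.lower()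
--     found = set()
--     score = 0
--     for i in range(len(q)):
--         for w, wt in weights.items():
--             if w not in found and q.startswith(w, i):
--                 found.add(w)
--                 score += wt
--     if score > 0:
--         return 'positive'
--     elif score < 0:
--         return 'negative'
--     else:
--         return 'neutral'
-- ===== Notes on version B (the rewrite author's own statement) =====
-- stated objective: alternative
-- what changed: Replaces A's keyword-driven containment tests (one 'word in text' scan per keyword, two counts compared) by a text-driven algorithm: one left-to-right scan of the lowercased question that, at each position, marks keywords starting there in a found-set and updates a single signed score at each keyword's first occurrence.
import Mathlib
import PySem

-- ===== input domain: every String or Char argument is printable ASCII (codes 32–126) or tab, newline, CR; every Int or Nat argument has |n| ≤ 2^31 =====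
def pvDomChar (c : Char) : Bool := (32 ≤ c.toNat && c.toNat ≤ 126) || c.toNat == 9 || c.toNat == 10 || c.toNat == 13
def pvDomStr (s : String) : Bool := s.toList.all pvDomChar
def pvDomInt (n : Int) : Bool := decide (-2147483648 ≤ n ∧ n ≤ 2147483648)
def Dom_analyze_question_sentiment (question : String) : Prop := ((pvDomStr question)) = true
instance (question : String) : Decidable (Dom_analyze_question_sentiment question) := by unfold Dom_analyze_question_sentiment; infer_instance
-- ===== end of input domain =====

-- B replaces A's per-keyword containment tests by one left-to-right scan of the text that
-- marks each keyword at its first occurrence and keeps one signed score (objective: alternative).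

-- ===== PORT A =====
def analyze_question_sentiment (question : String) : String :=
  let positive_words := ["good", "great", "excellent", "amazing", "helpful", "useful", "love", "best"]
  let negative_words := ["bad", "poor", "terrible", "awful", "hate", "worst", "difficult", "problem", "issue"]
  let question_lower := PySem.Str.lower question
  let positive_count : Int :=
    (positive_words.map (fun word => if PySem.Str.isIn word question_lower then (1 : Int) else 0)).sum
  let negative_count : Int :=
    (negative_words.map (fun word => if PySem.Str.isIn word question_lower then (1 : Int) else 0)).sum
  if positive_count > negative_count then "positive"
  else if negative_count > positive_count then "negative"
  else "neutral"

-- ===== PORT B =====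
-- the dict literal 'weights' (insertion order)
def pvWeights : List (String × Int) :=
  [("good", 1), ("great", 1), ("excellent", 1), ("amazing", 1), ("helpful", 1), ("useful", 1),
   ("love", 1), ("best", 1),
   ("bad", -1), ("poor", -1), ("terrible", -1), ("awful", -1), ("hate", -1), ("worst", -1),
   ("difficult", -1), ("problem", -1), ("issue", -1)]

-- the inner 'for w, wt in weights.items()' loop at text position i;
-- 'q.startswith(w, i)' is exactly 'Chars.startswith (q.drop i.toNat) w.toList' here since i comes from range(len(q)), so 0 ≤ i < len(q)
def pvScanAt (q : List Char) (st : PySem.Set String × Int) (i : Int) : PySem.Set String × Int :=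
  pvWeights.foldl
    (fun st p =>
      if !(PySem.Set.contains st.1 p.1) && PySem.Chars.startswith (q.drop i.toNat) p.1.toList then
        (PySem.Set.add st.1 p.1, st.2 + p.2)
      else st) st

def analyze_question_sentiment_alt (question : String) : String :=
  let q := (PySem.Str.lower question).toList
  let st := (PySem.List.pyRange 0 (q.length : Int) 1).foldl (pvScanAt q) (PySem.Set.empty, (0 : Int))
  if st.2 > 0 then "positive"
  else if st.2 < 0 then "negative"
  else "neutral"

-- ===== PRECONDITION & SPEC =====
def Spec_analyze_question_sentiment (question : String) (out : String) : Prop := out = analyze_question_sentiment_alt question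
instance (question : String) (out : String) : Decidable (Spec_analyze_question_sentiment question out) := by unfold Spec_analyze_question_sentiment; infer_instance

-- ===== CLAIM =====
def Claim_equal_analyze_question_sentiment : Prop := ∀ (question : String), Dom_analyze_question_sentiment question → Spec_analyze_question_sentiment question (analyze_question_sentiment question)

-- ===== LEMMAS AND PROOFS =====

-- (if c then (-1) else 0) pulled into a negation, so that ring can match atoms
theorem pv_neg_ite (c : Prop) [Decidable c] :
    (if c then (-1 : Int) else 0) = -(if c then (1 : Int) else 0) := by
  split <;> ring

theorem pv_not_mem_of_contains_false {s : PySem.Set String} {x : String}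
    (h : PySem.Set.contains s x = false) : x ∉ s := by
  intro hm
  rw [(PySem.Set.contains_iff s x).2 hm] at h
  exact absurd h (by decide)

-- merging the two ite contributions of one keyword (found now / found later) into one
theorem pv_ite_merge (A S C : Prop) [Decidable A] [Decidable S] [Decidable C] (v : Int) :
    (if ¬A ∧ S then v else 0) + (if (¬A ∧ ¬S) ∧ C then v else 0)
      = if ¬A ∧ (S ∨ C) then v else 0 := by
  by_cases hA : A <;> by_cases hS : S <;> by_cases hC : C <;> simp [hA, hS, hC]

-- the inner keyword loop at one position: membership in the found-set afterwards, and the score it adds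
theorem pvInner_fold (q : List Char) (i : Nat) (ks : List (String × Int))
    (hnd : (ks.map Prod.fst).Nodup) :
    ∀ (st : PySem.Set String × Int),
      (∀ w, w ∈ (ks.foldl
          (fun st p =>
            if !(PySem.Set.contains st.1 p.1) && PySem.Chars.startswith (q.drop i) p.1.toList then
              (PySem.Set.add st.1 p.1, st.2 + p.2)
            else st) st).1
        ↔ w ∈ st.1 ∨ ∃ p ∈ ks, p.1 = w ∧ PySem.Chars.startswith (q.drop i) p.1.toList = true)
      ∧ (ks.foldl
          (fun st p =>
            if !(PySem.Set.contains st.1 p.1) && PySem.Chars.startswith (q.drop i) p.1.toList then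
              (PySem.Set.add st.1 p.1, st.2 + p.2)
            else st) st).2
        = st.2 + (ks.map (fun p =>
            if p.1 ∉ st.1 ∧ PySem.Chars.startswith (q.drop i) p.1.toList = true then p.2 else 0)).sum := by
  induction ks with
  | nil => intro st; simp
  | cons p ks ih =>
    intro st
    simp only [List.map_cons, List.nodup_cons] at hnd
    obtain ⟨hp, hks⟩ := hnd
    simp only [List.foldl_cons, List.map_cons, List.sum_cons]
    by_cases hc : (!(PySem.Set.contains st.1 p.1) && PySem.Chars.startswith (q.drop i) p.1.toList) = true
    · simp only [Bool.and_eq_true, Bool.not_eq_true'] at hc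
      obtain ⟨hcont, hsw⟩ := hc
      have hmem : p.1 ∉ st.1 := pv_not_mem_of_contains_false hcont
      rw [if_pos (by rw [hcont, hsw]; rfl)]
      obtain ⟨ihm, ihs⟩ := ih hks (PySem.Set.add st.1 p.1, st.2 + p.2)
      constructor
      · intro w
        rw [ihm]
        simp only [PySem.Set.mem_add]
        constructor
        · rintro (⟨h | h⟩ | ⟨p', hp', h1, h2⟩)
          · exact Or.inl h
          · exact Or.inr ⟨p, List.mem_cons_self, h ▸ rfl, h ▸ hsw⟩
          · exact Or.inr ⟨p', List.mem_cons_of_mem _ hp', h1, h2⟩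
        · rintro (h | ⟨p', hp', h1, h2⟩)
          · exact Or.inl (Or.inl h)
          · rcases List.mem_cons.1 hp' with h | h
            · exact Or.inl (Or.inr (by rw [← h1, h]))
            · exact Or.inr ⟨p', h, h1, h2⟩
      · rw [ihs, if_pos ⟨hmem, hsw⟩]
        have hcong : (ks.map (fun p' =>
            if p'.1 ∉ (PySem.Set.add st.1 p.1) ∧ PySem.Chars.startswith (q.drop i) p'.1.toList = true then p'.2 else 0))
            = ks.map (fun p' =>
            if p'.1 ∉ st.1 ∧ PySem.Chars.startswith (q.drop i) p'.1.toList = true then p'.2 else 0) := by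
          apply List.map_congr_left
          intro p' hp'
          have hne : p'.1 ≠ p.1 := by
            intro h
            exact hp (h ▸ List.mem_map_of_mem hp')
          have hiff : p'.1 ∈ PySem.Set.add st.1 p.1 ↔ p'.1 ∈ st.1 := by
            rw [PySem.Set.mem_add]
            exact ⟨fun h => h.resolve_right hne, Or.inl⟩
          simp only [hiff]
        rw [hcong]; ring
    · rw [if_neg (by simpa using hc)]
      simp only [Bool.and_eq_true, Bool.not_eq_true'] at hc
      rw [Classical.not_and_iff_not_or_not] at hc
      have hc' : p.1 ∈ st.1 ∨ PySem.Chars.startswith (q.drop i) p.1.toList ≠ true := by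
        rcases hc with h | h
        · cases hcc : PySem.Set.contains st.1 p.1 with
          | true => exact Or.inl ((PySem.Set.contains_iff st.1 p.1).1 hcc)
          | false => exact absurd hcc h
        · exact Or.inr h
      obtain ⟨ihm, ihs⟩ := ih hks st
      constructor
      · intro w
        rw [ihm]
        constructor
        · rintro (h | ⟨p', hp', h1, h2⟩)
          · exact Or.inl h
          · exact Or.inr ⟨p', List.mem_cons_of_mem _ hp', h1, h2⟩
        · rintro (h | ⟨p', hp', h1, h2⟩)
          · exact Or.inl h
          · rcases List.mem_cons.1 hp' with h | h
            · subst h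
              rcases hc' with h | h
              · exact Or.inl (h1 ▸ h)
              · exact absurd h2 h
            · exact Or.inr ⟨p', h, h1, h2⟩
      · rw [ihs]
        have hz : (if p.1 ∉ st.1 ∧ PySem.Chars.startswith (q.drop i) p.1.toList = true then p.2 else 0) = 0 := by
          rw [if_neg]
          rintro ⟨h1, h2⟩
          rcases hc' with h | h
          · exact h1 h
          · exact h h2
        rw [hz]; ring

-- the keyword-name list has no duplicates (used to decouple the per-keyword states)
theorem pvWeights_nodup : (pvWeights.map Prod.fst).Nodup := by decide

-- merging position i's contribution with the later positions' contributions, keyword by keyword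
theorem pv_sum_merge (q : List Char) (i : Int) (is : List Int) (st Y : PySem.Set String × Int)
    (hmemp : ∀ p ∈ pvWeights,
      (p.1 ∈ Y.1 ↔ p.1 ∈ st.1 ∨ PySem.Chars.startswith (q.drop i.toNat) p.1.toList = true)) :
    (pvWeights.map
        (fun p => if p.1 ∉ st.1 ∧ PySem.Chars.startswith (q.drop i.toNat) p.1.toList = true then p.2 else 0)).sum
      + (pvWeights.map
        (fun p => if p.1 ∉ Y.1 ∧ ∃ i' ∈ is, PySem.Chars.startswith (q.drop i'.toNat) p.1.toList = true then p.2 else 0)).sum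
      = (pvWeights.map
        (fun p => if p.1 ∉ st.1 ∧ ∃ i' ∈ i :: is, PySem.Chars.startswith (q.drop i'.toNat) p.1.toList = true then p.2 else 0)).sum := by
  rw [← PySem.List.sum_map_add_int pvWeights
        (fun p => if p.1 ∉ st.1 ∧ PySem.Chars.startswith (q.drop i.toNat) p.1.toList = true then p.2 else 0)
        (fun p => if p.1 ∉ Y.1 ∧ ∃ i' ∈ is, PySem.Chars.startswith (q.drop i'.toNat) p.1.toList = true then p.2 else 0)]
  apply congrArg List.sum
  apply List.map_congr_left
  intro p hp
  have h2iff : (p.1 ∉ Y.1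
        ∧ ∃ i' ∈ is, PySem.Chars.startswith (q.drop i'.toNat) p.1.toList = true)
      ↔ ((¬ p.1 ∈ st.1 ∧ ¬ PySem.Chars.startswith (q.drop i.toNat) p.1.toList = true)
        ∧ ∃ i' ∈ is, PySem.Chars.startswith (q.drop i'.toNat) p.1.toList = true) := by
    rw [show (p.1 ∉ Y.1) = ¬ (p.1 ∈ Y.1) from rfl]
    rw [hmemp p hp]
    tauto
  have h3iff : (p.1 ∉ st.1 ∧ ∃ i' ∈ i :: is, PySem.Chars.startswith (q.drop i'.toNat) p.1.toList = true)
      ↔ (¬ p.1 ∈ st.1 ∧ (PySem.Chars.startswith (q.drop i.toNat) p.1.toList = true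
          ∨ ∃ i' ∈ is, PySem.Chars.startswith (q.drop i'.toNat) p.1.toList = true)) := by
    constructor
    · rintro ⟨h1, i', hi', h2⟩
      rcases List.mem_cons.1 hi' with h | h
      · exact ⟨h1, Or.inl (h ▸ h2)⟩
      · exact ⟨h1, Or.inr ⟨i', h, h2⟩⟩
    · rintro ⟨h1, h | ⟨i', hi', h2⟩⟩
      · exact ⟨h1, i, List.mem_cons_self, h⟩
      · exact ⟨h1, i', List.mem_cons_of_mem _ hi', h2⟩
  rw [if_congr h2iff rfl rfl, if_congr h3iff rfl rfl]
  exact pv_ite_merge _ _ _ p.2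

-- one step of the outer loop on the score component
theorem pv_score_step (q : List Char) (i : Int) (is : List Int) (st Y : PySem.Set String × Int)
    (hmemp : ∀ p ∈ pvWeights,
      (p.1 ∈ Y.1 ↔ p.1 ∈ st.1 ∨ PySem.Chars.startswith (q.drop i.toNat) p.1.toList = true))
    (isc' : Y.2 = st.2 + (pvWeights.map
        (fun p => if p.1 ∉ st.1 ∧ PySem.Chars.startswith (q.drop i.toNat) p.1.toList = true then p.2 else 0)).sum)
    (ohs : (is.foldl (pvScanAt q) Y).2 = Y.2 + (pvWeights.map
        (fun p => if p.1 ∉ Y.1 ∧ ∃ i' ∈ is, PySem.Chars.startswith (q.drop i'.toNat) p.1.toList = true then p.2 else 0)).sum) :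
    (is.foldl (pvScanAt q) Y).2 = st.2 + (pvWeights.map
        (fun p => if p.1 ∉ st.1 ∧ ∃ i' ∈ i :: is, PySem.Chars.startswith (q.drop i'.toNat) p.1.toList = true then p.2 else 0)).sum := by
  refine ohs.trans ?_
  rw [isc']
  linarith [pv_sum_merge q i is st Y hmemp]

-- the outer position loop: the final score adds, per keyword, its weight iff it starts at some visited position
set_option maxHeartbeats 1000000 in
theorem pvOuter_fold (q : List Char) :
    ∀ (is : List Int) (st : PySem.Set String × Int),
      (∀ w, w ∈ (is.foldl (pvScanAt q) st).1
        ↔ w ∈ st.1 ∨ ∃ p ∈ pvWeights, p.1 = w ∧ ∃ i ∈ is, PySem.Chars.startswith (q.drop i.toNat) p.1.toList = true)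
      ∧ (is.foldl (pvScanAt q) st).2
        = st.2 + (pvWeights.map (fun p =>
            if p.1 ∉ st.1 ∧ ∃ i ∈ is, PySem.Chars.startswith (q.drop i.toNat) p.1.toList = true then p.2 else 0)).sum := by
  intro is
  induction is with
  | nil => intro st; simp
  | cons i is ih =>
    intro st
    obtain ⟨im, isc⟩ := pvInner_fold q i.toNat pvWeights pvWeights_nodup st
    obtain ⟨Y, hY⟩ : ∃ Y, pvScanAt q st i = Y := ⟨_, rfl⟩
    have im' : ∀ w, w ∈ Y.1
        ↔ w ∈ st.1 ∨ ∃ p ∈ pvWeights, p.1 = w ∧ PySem.Chars.startswith (q.drop i.toNat) p.1.toList = true := by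
      rw [← hY]; exact fun w => im w
    have isc' : Y.2
        = st.2 + (pvWeights.map (fun p =>
            if p.1 ∉ st.1 ∧ PySem.Chars.startswith (q.drop i.toNat) p.1.toList = true then p.2 else 0)).sum := by
      rw [← hY]; exact isc
    have hmemp : ∀ p ∈ pvWeights,
        (p.1 ∈ Y.1 ↔ p.1 ∈ st.1 ∨ PySem.Chars.startswith (q.drop i.toNat) p.1.toList = true) := by
      intro p hp
      rw [im' p.1]
      constructor
      · rintro (h | ⟨p', _, h1, h2⟩)
        · exact Or.inl h
        · exact Or.inr (h1 ▸ h2)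
      · rintro (h | h)
        · exact Or.inl h
        · exact Or.inr ⟨p, hp, rfl, h⟩
    obtain ⟨ohm, ohs⟩ := ih Y
    simp only [List.foldl_cons, hY]
    constructor
    · intro w
      rw [ohm w, im' w]
      constructor
      · rintro ((h | ⟨p, hp, h1, h2⟩) | ⟨p, hp, h1, i', hi', h2⟩)
        · exact Or.inl h
        · exact Or.inr ⟨p, hp, h1, i, List.mem_cons_self, h2⟩
        · exact Or.inr ⟨p, hp, h1, i', List.mem_cons_of_mem _ hi', h2⟩
      · rintro (h | ⟨p, hp, h1, i', hi', h2⟩)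
        · exact Or.inl (Or.inl h)
        · rcases List.mem_cons.1 hi' with h | h
          · exact Or.inl (Or.inr ⟨p, hp, h1, h ▸ h2⟩)
          · exact Or.inr ⟨p, hp, h1, i', h, h2⟩
    · exact pv_score_step q i is st Y hmemp isc' ohs

-- a keyword starts at some position of range(len(q)) iff it is a substring (for a nonempty keyword)
theorem pvRange_any (q : List Char) (w : List Char) (hw : w ≠ []) :
    (∃ i ∈ PySem.List.pyRange 0 (q.length : Int) 1,
        PySem.Chars.startswith (q.drop i.toNat) w = true)
      ↔ PySem.Chars.isIn w q = true := by
  constructor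
  · rintro ⟨i, _, hsw⟩
    rw [← PySem.Chars.exists_prefix_drop_iff_isIn]
    exact ⟨i.toNat, (PySem.Chars.startswith_iff _ _).1 hsw⟩
  · intro h
    obtain ⟨j, hj⟩ := (PySem.Chars.exists_prefix_drop_iff_isIn w q).2 h
    have hjlt : j < q.length := by
      by_contra hge
      rw [List.drop_eq_nil_of_le (by omega)] at hj
      exact hw (List.prefix_nil.1 hj)
    refine ⟨(j : Int), PySem.List.mem_pyRange_one.2 ⟨by positivity, by exact_mod_cast hjlt⟩, ?_⟩
    rw [PySem.Chars.startswith_iff]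
    simpa using hj

-- every keyword is a nonempty string
theorem pvWeights_ne_nil : ∀ p ∈ pvWeights, p.1.toList ≠ [] := by decide

-- the weighted sum over the keyword table splits into A's positive count minus A's negative count
theorem pvSum_split (f : String → Prop) [DecidablePred f] :
    (pvWeights.map (fun p => if f p.1 then p.2 else 0)).sum
      = (["good", "great", "excellent", "amazing", "helpful", "useful", "love", "best"].map
          (fun w => if f w then (1 : Int) else 0)).sum
        - (["bad", "poor", "terrible", "awful", "hate", "worst", "difficult", "problem", "issue"].map
          (fun w => if f w then (1 : Int) else 0)).sum := by
  simp only [pvWeights, List.map_cons, List.map_nil, List.sum_cons, List.sum_nil, pv_neg_ite]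
  ring

-- ===== VERDICT =====
theorem analyze_question_sentiment_spec : Claim_equal_analyze_question_sentiment := by
  intro question _
  unfold Spec_analyze_question_sentiment
  simp only [analyze_question_sentiment, analyze_question_sentiment_alt]
  obtain ⟨_, hs⟩ := pvOuter_fold (PySem.Str.lower question).toList
    (PySem.List.pyRange 0 ((PySem.Str.lower question).toList.length : Int) 1)
    (PySem.Set.empty, (0 : Int))
  rw [hs]
  have hconds : (pvWeights.map (fun p =>
      if p.1 ∉ (PySem.Set.empty (α := String), (0 : Int)).1
          ∧ ∃ i ∈ PySem.List.pyRange 0 ((PySem.Str.lower question).toList.length : Int) 1,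
            PySem.Chars.startswith ((PySem.Str.lower question).toList.drop i.toNat) p.1.toList = true
        then p.2 else 0))
      = pvWeights.map (fun p =>
        if PySem.Chars.isIn p.1.toList (PySem.Str.lower question).toList = true then p.2 else 0) := by
    apply List.map_congr_left
    intro p hp
    have hiff : (p.1 ∉ (PySem.Set.empty (α := String), (0 : Int)).1
          ∧ ∃ i ∈ PySem.List.pyRange 0 ((PySem.Str.lower question).toList.length : Int) 1,
            PySem.Chars.startswith ((PySem.Str.lower question).toList.drop i.toNat) p.1.toList = true)
        ↔ PySem.Chars.isIn p.1.toList (PySem.Str.lower question).toList = true := by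
      constructor
      · rintro ⟨_, h⟩
        exact (pvRange_any _ _ (pvWeights_ne_nil p hp)).1 h
      · intro h
        exact ⟨List.not_mem_nil, (pvRange_any _ _ (pvWeights_ne_nil p hp)).2 h⟩
    rw [if_congr hiff rfl rfl]
  rw [hconds, pvSum_split (fun w => PySem.Chars.isIn w.toList (PySem.Str.lower question).toList = true)]
  have hbr : ∀ word : String, PySem.Str.isIn word (PySem.Str.lower question)
      = PySem.Chars.isIn word.toList (PySem.Str.lower question).toList := by
    intro word; simp
  simp only [hbr]
  generalize ((["good", "great", "excellent", "amazing", "helpful", "useful", "love", "best"].map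
      (fun w => if PySem.Chars.isIn w.toList (PySem.Str.lower question).toList = true then (1 : Int) else 0)).sum) = P
  generalize ((["bad", "poor", "terrible", "awful", "hate", "worst", "difficult", "problem", "issue"].map
      (fun w => if PySem.Chars.isIn w.toList (PySem.Str.lower question).toList = true then (1 : Int) else 0)).sum) = N
  split_ifs <;> first | rfl | omega
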